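-- pv_equiv track=rewrite | github.com/HaShira-Lab/torah-phonetic-architecture | src/analyses/layer_c/layer_c_syllable_distance.py | build_stream
-- ===== SOURCE A (Python) =====
-- VOWELS = set("aeiou")
--
-- DIGRAPHS = ["sh", "ts", "kh"]
--
-- def tokenize(text):
--     tokens = []
--     i = 0
--     while i < len(text):
--         if text[i] in [" ", "|"]:
--             i += 1
--             continue
--         if i+1 < len(text) and text[i:i+2] in DIGRAPHS:
--             tokens.append(text[i:i+2])
--             i += 2
--         else:
--             tokens.append(text[i])
--             i += 1
--     return tokens
--
-- def is_vowel(t):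
--     return any(c in VOWELS for c in t)
--
-- def normalize(t, eq_kh_k, eq_ts_s):
--     if eq_kh_k and t == "kh":
--         return "k"
--     if eq_ts_s and t == "ts":
--         return "s"
--     return t
--
-- def build_stream(text, mode, eq_kh_k, eq_ts_s):
--     tokens = tokenize(text)
--     stream = []
--     prev_c = None
--     n = len(tokens)
--
--     for i in range(n):
--         t = normalize(tokens[i], eq_kh_k, eq_ts_s)
--
--         if is_vowel(t):
--             j = i + 1
--             cons = []
--
--             while j < n:
--                 tj = normalize(tokens[j], eq_kh_k, eq_ts_s)
--                 if is_vowel(tj):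
--                     break
--                 cons.append(tj)
--                 j += 1
--
--             if cons:
--                 stream.append(t + "".join(cons))
--             else:
--                 if mode == "permissive" and prev_c:
--                     stream.append(prev_c + t)
--         else:
--             prev_c = t
--
--     return [r for r in stream if len(r) >= 2]
-- ===== SOURCE B (Python) =====
-- VOWELS = set("aeiou")
--
-- DIGRAPHS = ["sh", "ts", "kh"]
--
-- def tokenize(text):
--     tokens = []
--     i = 0
--     while i < len(text):
--         if text[i] in [" ", "|"]:
--             i += 1
--             continue
--         if i+1 < len(text) and text[i:i+2] in DIGRAPHS:
--             tokens.append(text[i:i+2])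
--             i += 2
--         else:
--             tokens.append(text[i])
--             i += 1
--     return tokens
--
-- def is_vowel(t):
--     return any(c in VOWELS for c in t)
--
-- def normalize(t, eq_kh_k, eq_ts_s):
--     if eq_kh_k and t == "kh":
--         return "k"
--     if eq_ts_s and t == "ts":
--         return "s"
--     return t
--
-- def build_stream(text, mode, eq_kh_k, eq_ts_s):
--     # single forward pass: keep the pending vowel with its consonant buffer
--     toks = [normalize(t, eq_kh_k, eq_ts_s) for t in tokenize(text)]
--     out = []
--     pending = None        # (vowel, consonant buffer)
--     prev_c = None         # last consonant seen
--
--     def finalize():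
--         if pending is None:
--             return
--         v, buf = pending
--         if buf:
--             out.append(v + "".join(buf))
--         elif mode == "permissive" and prev_c:
--             out.append(prev_c + v)
--
--     for t in toks:
--         if is_vowel(t):
--             finalize()
--             pending = (t, [])
--         else:
--             if pending is not None:
--                 pending[1].append(t)
--             prev_c = t
--     finalize()
--     return [r for r in out if len(r) >= 2]
-- ===== Notes on version B (the rewrite author's own statement) =====
-- stated objective: alternative
-- what changed: Replaces A's per-vowel forward rescan (inner while loop over upcoming consonants for every vowel) by a single forward pass that keeps one pending vowel with its accumulated consonant buffer and the last-seen consonant, finalizing a pending vowel when the next vowel (or end of input) is reached.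
import Mathlib
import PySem

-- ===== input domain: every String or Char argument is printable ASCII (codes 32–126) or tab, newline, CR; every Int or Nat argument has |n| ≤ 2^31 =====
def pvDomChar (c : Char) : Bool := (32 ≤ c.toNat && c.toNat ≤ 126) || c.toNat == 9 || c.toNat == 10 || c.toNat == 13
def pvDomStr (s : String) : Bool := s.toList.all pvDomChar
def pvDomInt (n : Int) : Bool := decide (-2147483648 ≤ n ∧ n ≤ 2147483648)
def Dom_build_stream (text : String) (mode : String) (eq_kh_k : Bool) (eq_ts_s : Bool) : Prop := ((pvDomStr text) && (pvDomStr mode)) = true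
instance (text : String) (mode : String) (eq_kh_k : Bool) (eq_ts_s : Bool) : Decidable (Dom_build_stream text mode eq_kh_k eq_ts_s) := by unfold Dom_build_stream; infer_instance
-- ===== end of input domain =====

-- B replaces A's per-vowel forward rescan by one linear pass keeping a pending vowel
-- with its consonant buffer and the last-seen consonant.

-- shared module-level helpers of Source A / Source B (tokenize, is_vowel, normalize, "".join)

def pvTokenize : List Char → List String
  | [] => []
  | [c] => if c = ' ' ∨ c = '|' then [] else [String.mk [c]]
  | c :: c2 :: rest2 =>
    if c = ' ' ∨ c = '|' then pvTokenize (c2 :: rest2)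
    else if String.mk [c, c2] ∈ ["sh", "ts", "kh"] then
      String.mk [c, c2] :: pvTokenize rest2
    else
      String.mk [c] :: pvTokenize (c2 :: rest2)

def pvIsVowel (t : String) : Bool := t.toList.any (fun c => c ∈ ['a', 'e', 'i', 'o', 'u'])

def pvNormalize (t : String) (eq_kh_k : Bool) (eq_ts_s : Bool) : String :=
  if eq_kh_k ∧ t = "kh" then "k"
  else if eq_ts_s ∧ t = "ts" then "s"
  else t

-- Python "".join(cons)
def pvJoin (l : List String) : String := l.foldl (fun a b => a ++ b) ""

-- ===== PORT A =====

-- A's inner `while j < n` loop collecting consonants from index j on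
def pvScanCons (tokens : List String) (eq_kh_k : Bool) (eq_ts_s : Bool) (j : Nat) : List String :=
  if h : j < tokens.length then
    let tj := pvNormalize (tokens.getD j "") eq_kh_k eq_ts_s
    if pvIsVowel tj then []
    else tj :: pvScanCons tokens eq_kh_k eq_ts_s (j + 1)
  else []
termination_by tokens.length - j

-- A's `for i in range(n)` loop over (stream, prev_c)
def pvLoopA (tokens : List String) (mode : String) (eq_kh_k : Bool) (eq_ts_s : Bool)
    (n : Nat) (i : Nat) (stream : List String) (prev : Option String) : List String :=
  if h : i < n then
    let t := pvNormalize (tokens.getD i "") eq_kh_k eq_ts_s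
    if pvIsVowel t then
      let cons := pvScanCons tokens eq_kh_k eq_ts_s (i + 1)
      if cons ≠ [] then
        pvLoopA tokens mode eq_kh_k eq_ts_s n (i + 1) (stream ++ [t ++ pvJoin cons]) prev
      else
        match prev with
        | some p =>
          if mode = "permissive" then
            pvLoopA tokens mode eq_kh_k eq_ts_s n (i + 1) (stream ++ [p ++ t]) prev
          else
            pvLoopA tokens mode eq_kh_k eq_ts_s n (i + 1) stream prev
        | none => pvLoopA tokens mode eq_kh_k eq_ts_s n (i + 1) stream prev
    else
      pvLoopA tokens mode eq_kh_k eq_ts_s n (i + 1) stream (some t)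
  else stream
termination_by n - i

def build_stream (text : String) (mode : String) (eq_kh_k : Bool) (eq_ts_s : Bool) : List String :=
  (pvLoopA (pvTokenize text.toList) mode eq_kh_k eq_ts_s (pvTokenize text.toList).length 0 [] none).filter
    (fun r => 2 ≤ r.length)

-- ===== PORT B =====

-- Source B's finalize(): emit the pending vowel given the current prev_c
def pvFinalize (mode : String) (pending : Option (String × List String)) (prev : Option String) : List String :=
  match pending with
  | none => []
  | some (v, buf) =>
    if buf ≠ [] then [v ++ pvJoin buf]
    else
      match prev with
      | some p => if mode = "permissive" then [p ++ v] else []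
      | none => []

-- Source B's single forward pass over the normalized tokens
def pvLoopB (mode : String) : List String → Option (String × List String) → Option String → List String
  | [], pending, prev => pvFinalize mode pending prev
  | t :: rest, pending, prev =>
    if pvIsVowel t then
      pvFinalize mode pending prev ++ pvLoopB mode rest (some (t, [])) prev
    else
      pvLoopB mode rest (pending.map (fun pr => (pr.1, pr.2 ++ [t]))) (some t)

def build_stream_alt (text : String) (mode : String) (eq_kh_k : Bool) (eq_ts_s : Bool) : List String :=
  (pvLoopB mode ((pvTokenize text.toList).map (fun t => pvNormalize t eq_kh_k eq_ts_s)) none none).filter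
    (fun r => 2 ≤ r.length)

-- ===== PRECONDITION & SPEC =====
def Spec_build_stream (text : String) (mode : String) (eq_kh_k : Bool) (eq_ts_s : Bool) (out : List String) : Prop := out = build_stream_alt text mode eq_kh_k eq_ts_s
instance (text : String) (mode : String) (eq_kh_k : Bool) (eq_ts_s : Bool) (out : List String) : Decidable (Spec_build_stream text mode eq_kh_k eq_ts_s out) := by unfold Spec_build_stream; infer_instance

-- ===== CLAIM (what is proved, stated in full; the proofs are below) =====
def Claim_equal_build_stream : Prop := ∀ (text : String) (mode : String) (eq_kh_k : Bool) (eq_ts_s : Bool), Dom_build_stream text mode eq_kh_k eq_ts_s → Spec_build_stream text mode eq_kh_k eq_ts_s (build_stream text mode eq_kh_k eq_ts_s)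

-- ===== LEMMAS AND PROOFS =====

-- common reference recursion (suffix form of A's loop)
def pvRef (mode : String) : List String → Option String → List String
  | [], _ => []
  | t :: rest, prev =>
    if pvIsVowel t then
      (let cons := rest.takeWhile (fun x => ¬ pvIsVowel x)
       if cons ≠ [] then [t ++ pvJoin cons]
       else
         match prev with
         | some p => if mode = "permissive" then [p ++ t] else []
         | none => []) ++ pvRef mode rest prev
    else
      pvRef mode rest (some t)

theorem pvRef_nil (mode : String) (prev : Option String) : pvRef mode [] prev = [] := rfl

theorem pvRef_cons (mode : String) (t : String) (rest : List String) (prev : Option String) :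
    pvRef mode (t :: rest) prev
      = if pvIsVowel t then
          (let cons := rest.takeWhile (fun x => ¬ pvIsVowel x)
           if cons ≠ [] then [t ++ pvJoin cons]
           else
             match prev with
             | some p => if mode = "permissive" then [p ++ t] else []
             | none => []) ++ pvRef mode rest prev
        else pvRef mode rest (some t) := rfl

theorem pvNormalize_getD (tokens : List String) (eq_kh_k eq_ts_s : Bool) (i : Nat) :
    pvNormalize (tokens.getD i "") eq_kh_k eq_ts_s
      = (tokens.map (fun t => pvNormalize t eq_kh_k eq_ts_s)).getD i "" := by
  by_cases h : i < tokens.length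
  · rw [List.getD_eq_getElem _ _ h, List.getD_eq_getElem _ _ (by simpa using h)]
    simp
  · rw [List.getD_eq_default _ _ (by omega), List.getD_eq_default _ _ (by simpa using (by omega : ¬ i < tokens.length))]
    simp [pvNormalize]

theorem pvScanCons_eq (tokens : List String) (eq_kh_k eq_ts_s : Bool) (j : Nat) :
    pvScanCons tokens eq_kh_k eq_ts_s j
      = ((tokens.map (fun t => pvNormalize t eq_kh_k eq_ts_s)).drop j).takeWhile (fun x => ¬ pvIsVowel x) := by
  set toksN := tokens.map (fun t => pvNormalize t eq_kh_k eq_ts_s) with htoksN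
  have hlen : toksN.length = tokens.length := by simp [htoksN]
  induction hwf : tokens.length - j using Nat.strong_induction_on generalizing j with
  | _ k ih =>
    rw [pvScanCons]
    by_cases h : j < tokens.length
    · have hget : toksN.drop j = toksN.getD j "" :: toksN.drop (j + 1) := by
        rw [List.getD_eq_getElem _ _ (by omega)]
        exact (List.drop_eq_getElem_cons (by omega)).trans rfl
      rw [dif_pos h, pvNormalize_getD, ← htoksN, hget, List.takeWhile_cons]
      by_cases hv : pvIsVowel (toksN.getD j "")
      · simp only [List.getD] at hv
        simp [hv]
      · simp only [List.getD] at hv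
        rw [ih (tokens.length - (j + 1)) (by omega) (j + 1) rfl]
        simp [hv]
    · rw [dif_neg h, List.drop_eq_nil_of_le (by omega), List.takeWhile_nil]

theorem pvLoopA_eq (tokens : List String) (mode : String) (eq_kh_k eq_ts_s : Bool)
    (i : Nat) (stream : List String) (prev : Option String) :
    pvLoopA tokens mode eq_kh_k eq_ts_s tokens.length i stream prev
      = stream ++ pvRef mode ((tokens.map (fun t => pvNormalize t eq_kh_k eq_ts_s)).drop i) prev := by
  set toksN := tokens.map (fun t => pvNormalize t eq_kh_k eq_ts_s) with htoksN
  have hlen : toksN.length = tokens.length := by simp [htoksN]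
  induction hwf : tokens.length - i using Nat.strong_induction_on generalizing i stream prev with
  | _ k ih =>
    rw [pvLoopA]
    by_cases h : i < tokens.length
    · have hget : toksN.drop i = toksN.getD i "" :: toksN.drop (i + 1) := by
        rw [List.getD_eq_getElem _ _ (by omega)]
        exact (List.drop_eq_getElem_cons (by omega)).trans rfl
      rw [dif_pos h]
      simp only [pvNormalize_getD, ← htoksN]
      rw [hget, pvRef_cons]
      have IH : ∀ (s : List String) (p : Option String),
          pvLoopA tokens mode eq_kh_k eq_ts_s tokens.length (i + 1) s p
            = s ++ pvRef mode (toksN.drop (i + 1)) p :=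
        fun s p => ih (tokens.length - (i + 1)) (by omega) (i + 1) s p rfl
      by_cases hv : pvIsVowel (toksN.getD i "")
      · simp only [hv, if_pos]
        rw [pvScanCons_eq, ← htoksN]
        cases prev with
        | none => split_ifs with hc <;> (refine (IH _ _).trans ?_; simp)
        | some p => split_ifs with hc hm <;> (refine (IH _ _).trans ?_; simp)
      · simp only [hv, if_neg, if_false, Bool.false_eq_true]
        exact IH _ _
    · rw [dif_neg h, List.drop_eq_nil_of_le (by omega), pvRef_nil]
      simp

-- B's pass with a pending vowel equals the reference, general buffer version
theorem pvLoopB_pending (mode : String) (toks : List String) (v : String) (buf : List String) (prev : Option String) :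
    pvLoopB mode toks (some (v, buf)) prev
      = (let cons := buf ++ toks.takeWhile (fun x => ¬ pvIsVowel x)
         if cons ≠ [] then [v ++ pvJoin cons]
         else
           match prev with
           | some p => if mode = "permissive" then [p ++ v] else []
           | none => []) ++ pvRef mode toks prev := by
  induction toks generalizing v buf prev with
  | nil =>
    rw [pvRef_nil]
    simp only [pvLoopB, pvFinalize, List.takeWhile_nil, List.append_nil]
  | cons t rest ih =>
    by_cases hv : pvIsVowel t
    · rw [pvRef_cons]
      simp only [pvLoopB, hv, if_pos, pvFinalize]
      rw [ih]
      simp [hv]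
    · rw [pvRef_cons]
      simp only [pvLoopB, hv, if_false, Bool.false_eq_true, Option.map_some]
      rw [ih]
      have hTW : (t :: rest).takeWhile (fun x => ¬ pvIsVowel x)
          = t :: rest.takeWhile (fun x => ¬ pvIsVowel x) := by
        simp [hv]
      have h1 : buf ++ [t] ++ rest.takeWhile (fun x => ¬ pvIsVowel x)
          = buf ++ t :: rest.takeWhile (fun x => ¬ pvIsVowel x) := by simp
      simp only [hTW, ← h1]
      simp

theorem pvLoopB_none (mode : String) (toks : List String) (prev : Option String) :
    pvLoopB mode toks none prev = pvRef mode toks prev := by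
  induction toks generalizing prev with
  | nil => rfl
  | cons t rest ih =>
    by_cases hv : pvIsVowel t
    · rw [pvRef_cons]
      simp only [pvLoopB, hv, if_pos, pvFinalize, List.nil_append]
      rw [pvLoopB_pending]
      simp [hv]
    · rw [pvRef_cons]
      simp only [pvLoopB, hv, if_neg, if_false, Bool.false_eq_true, Option.map_none]
      exact ih (some t)

-- ===== VERDICT (by name: the statement is the Claim_ definition above) =====
theorem build_stream_spec : Claim_equal_build_stream := by
  intro text mode eq_kh_k eq_ts_s _
  unfold Spec_build_stream build_stream build_stream_alt
  rw [pvLoopB_none, pvLoopA_eq]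
  simp
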